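-- pv_equiv track=rewrite | github.com/CoderTrex/Baekjoon | programmers-past-question/2020-kakao-internship/maximize-formular.py | solution
-- ===== SOURCE A (Python) =====
-- def solution(expression):
--     numbers = []
--     operators = []
--
--     num = 0
--     for i in expression:
--         if i.isdigit():
--             num = num * 10 + int(i)
--         else:
--             operators.append(i)
--             numbers.append(num)
--             num = 0
--     numbers.append(num)
--
--     operators_order = [["*", "+", "-"], ["*", "-", "+"], ["+", "*", "-"], ["+", "-", "*"], ["-", "*", "+"], ["-", "+", "*"]]
--     max_value = -1
--
--     for order in operators_order:
--         temp_numbers = numbers.copy()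
--         temp_operators = operators.copy()
--         for order_operator in order:
--             i = 0
--             while i < len(temp_operators):
--                 if temp_operators[i] == order_operator:
--                     if order_operator == "*":
--                         temp_numbers[i] = temp_numbers[i] * temp_numbers[i+1]
--                     elif order_operator == "+":
--                         temp_numbers[i] = temp_numbers[i] + temp_numbers[i+1]
--                     else:
--                         temp_numbers[i] = temp_numbers[i] - temp_numbers[i+1]
--                     temp_numbers.pop(i+1)
--                     temp_operators.pop(i)
--                 else:
--                     i += 1
--         if abs(temp_numbers[0]) > max_value:
--             max_value = abs(temp_numbers[0])
--     return max_value
-- ===== SOURCE B (Python) =====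
-- def _reduce_once(nums, ops, op):
--     # one linear pass: combine adjacent operands joined by `op`, keep the rest
--     new_nums = [nums[0]]
--     new_ops = []
--     for o, n in zip(ops, nums[1:]):
--         if o == op:
--             if op == "*":
--                 new_nums[-1] = new_nums[-1] * n
--             elif op == "+":
--                 new_nums[-1] = new_nums[-1] + n
--             else:
--                 new_nums[-1] = new_nums[-1] - n
--         else:
--             new_ops.append(o)
--             new_nums.append(n)
--     return new_nums, new_ops
--
--
-- def solution(expression):
--     nums = []
--     ops = []
--     num = 0
--     for ch in expression:
--         if ch.isdigit():
--             num = num * 10 + int(ch)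
--         else:
--             ops.append(ch)
--             nums.append(num)
--             num = 0
--     nums.append(num)
--
--     best = -1
--     for order in (["*", "+", "-"], ["*", "-", "+"], ["+", "*", "-"],
--                   ["+", "-", "*"], ["-", "*", "+"], ["-", "+", "*"]):
--         ns, os_ = nums, ops
--         for op in order:
--             ns, os_ = _reduce_once(ns, os_, op)
--         best = max(best, abs(ns[0]))
--     return best
-- ===== Notes on version B (the rewrite author's own statement) =====
-- stated objective: alternative
-- what changed: Each operator-precedence pass rebuilds the number/operator lists in one forward sweep, merging adjacent operands on a match, instead of A's in-place index scan that mutates with pop(i).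
import Mathlib
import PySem

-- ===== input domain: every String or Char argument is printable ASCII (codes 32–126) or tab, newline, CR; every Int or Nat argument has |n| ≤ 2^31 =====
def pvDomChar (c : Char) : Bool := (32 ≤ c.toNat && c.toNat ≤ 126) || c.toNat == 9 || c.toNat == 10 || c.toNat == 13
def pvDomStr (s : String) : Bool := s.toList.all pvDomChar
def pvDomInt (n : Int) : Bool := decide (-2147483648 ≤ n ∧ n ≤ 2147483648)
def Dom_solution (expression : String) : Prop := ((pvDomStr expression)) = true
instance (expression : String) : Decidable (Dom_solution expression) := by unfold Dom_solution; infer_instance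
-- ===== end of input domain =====

-- B replaces A's index-scan-with-pop(i) reduction passes by passes that rebuild the
-- number/operator lists in one forward sweep (objective: alternative evaluation strategy).

-- ===== PORT A =====

-- tokenising loop shared verbatim by both Pythons: digits accumulate into num,
-- any other character is pushed as an operator
def pvParse (expression : String) : List Int × List Char :=
  let st := expression.toList.foldl
    (fun (st : List Int × List Char × Int) ch =>
      if ch.isDigit then (st.1, st.2.1, st.2.2 * 10 + ((ch.toNat : Int) - 48))
      else (st.1 ++ [st.2.2], st.2.1 ++ [ch], 0))
    ([], [], 0)
  (st.1 ++ [st.2.2], st.2.1)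

-- A's inner while loop: scan with index i, pop in place on a match
def pvWhileA (op : Char) (nums : List Int) (ops : List Char) (i : Nat) :
    List Int × List Char :=
  if h : i < ops.length then
    if ops[i] = op then
      pvWhileA op
        ((nums.set i
          (if op = '*' then nums.getD i 0 * nums.getD (i+1) 0
           else if op = '+' then nums.getD i 0 + nums.getD (i+1) 0
           else nums.getD i 0 - nums.getD (i+1) 0)).eraseIdx (i+1))
        (ops.eraseIdx i) i
    else pvWhileA op nums ops (i+1)
  else (nums, ops)
termination_by ops.length - i
decreasing_by
  · simp only [List.length_eraseIdx_of_lt h]; omega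
  · omega

def solution (expression : String) : Int :=
  let p := pvParse expression
  [['*','+','-'],['*','-','+'],['+','*','-'],['+','-','*'],['-','*','+'],['-','+','*']].foldl
    (fun mv ord =>
      let r := ord.foldl (fun q o => pvWhileA o q.1 q.2 0) p
      if |r.1.getD 0 0| > mv then |r.1.getD 0 0| else mv)
    (-1)

-- ===== PORT B =====

-- B's linear pass: walk the (operator, next-number) pairs once, merging into the
-- current number on a match, emitting it otherwise
def pvReduceLoop (op : Char) (cur : Int) (pairs : List (Char × Int)) :
    List Int × List Char :=
  match pairs with
  | [] => ([cur], [])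
  | (o, n) :: rest =>
    if o = op then
      pvReduceLoop op
        (if op = '*' then cur * n else if op = '+' then cur + n else cur - n) rest
    else
      let r := pvReduceLoop op n rest
      (cur :: r.1, o :: r.2)

def pvReduceOnce (nums : List Int) (ops : List Char) (op : Char) :
    List Int × List Char :=
  pvReduceLoop op (nums.headD 0) (ops.zip nums.tail)

def solution_alt (expression : String) : Int :=
  let p := pvParse expression
  [['*','+','-'],['*','-','+'],['+','*','-'],['+','-','*'],['-','*','+'],['-','+','*']].foldl
    (fun best ord =>
      let r := ord.foldl (fun q o => pvReduceOnce q.1 q.2 o) p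
      max best |r.1.headD 0|)
    (-1)

-- ===== PRECONDITION & SPEC =====
def Spec_solution (expression : String) (out : Int) : Prop := out = solution_alt expression
instance (expression : String) (out : Int) : Decidable (Spec_solution expression out) := by unfold Spec_solution; infer_instance

-- ===== CLAIM (what is proved, stated in full; the proofs are below) =====
def Claim_equal_solution : Prop := ∀ (expression : String), Dom_solution expression → Spec_solution expression (solution expression)

-- ===== LEMMAS AND PROOFS =====

lemma pv_set_append (pn : List Int) (c : Int) (l : List Int) (v : Int) (i : Nat)
    (h : i = pn.length) : (pn ++ c :: l).set i v = pn ++ v :: l := by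
  subst h
  induction pn with
  | nil => rfl
  | cons a t ih => simp [ih]

lemma pv_erase_append {α : Type} (pn : List α) (x : α) (l : List α) (i : Nat)
    (h : i = pn.length) : (pn ++ x :: l).eraseIdx i = pn ++ l := by
  subst h
  induction pn with
  | nil => rfl
  | cons a t ih => simp [ih]

lemma pv_getD_append (pn : List Int) (c : Int) (l : List Int) (i : Nat)
    (h : i = pn.length) : (pn ++ c :: l).getD i 0 = c := by
  subst h
  simp

lemma pv_getElem_append {α : Type} (pn : List α) (x : α) (l : List α) (i : Nat)
    (hi : i = pn.length) (h : i < (pn ++ x :: l).length) : (pn ++ x :: l)[i] = x := by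
  subst hi
  simp

-- key lemma: A's in-place while loop starting at index po.length over the lists
-- (pn ++ c :: snd pairs, po ++ fst pairs) computes B's single linear pass on (c, pairs),
-- the prefix already scanned being left untouched
lemma pvWhileA_eq (op : Char) (pairs : List (Char × Int)) :
    ∀ (pn : List Int) (po : List Char) (c : Int), pn.length = po.length →
      pvWhileA op (pn ++ c :: pairs.map Prod.snd) (po ++ pairs.map Prod.fst) po.length =
        (pn ++ (pvReduceLoop op c pairs).1, po ++ (pvReduceLoop op c pairs).2) := by
  induction pairs with
  | nil =>
    intro pn po c h
    rw [pvWhileA]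
    simp [pvReduceLoop]
  | cons p rest ih =>
    intro pn po c h
    obtain ⟨o, m⟩ := p
    have hlt : po.length < (po ++ ((o, m) :: rest).map Prod.fst).length := by simp
    rw [pvWhileA, dif_pos hlt]
    have hget : (po ++ ((o, m) :: rest).map Prod.fst)[po.length] = o :=
      pv_getElem_append po o (rest.map Prod.fst) po.length rfl hlt
    by_cases ho : o = op
    · subst ho
      rw [if_pos hget]
      rw [pv_getD_append pn c (((o, m) :: rest).map Prod.snd) po.length h.symm]
      rw [show pn ++ c :: ((o, m) :: rest).map Prod.snd =
            (pn ++ [c]) ++ m :: rest.map Prod.snd from by simp]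
      rw [pv_getD_append (pn ++ [c]) m (rest.map Prod.snd) (po.length + 1) (by simp [← h])]
      rw [show (pn ++ [c]) ++ m :: rest.map Prod.snd =
            pn ++ c :: ((o, m) :: rest).map Prod.snd from by simp]
      rw [pv_set_append pn c (((o, m) :: rest).map Prod.snd)
            (if o = '*' then c * m else if o = '+' then c + m else c - m) po.length h.symm]
      rw [show pn ++ (if o = '*' then c * m else if o = '+' then c + m else c - m) ::
            ((o, m) :: rest).map Prod.snd =
            (pn ++ [if o = '*' then c * m else if o = '+' then c + m else c - m]) ++
              m :: rest.map Prod.snd from by simp]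
      rw [pv_erase_append (pn ++ [if o = '*' then c * m else if o = '+' then c + m else c - m])
            m (rest.map Prod.snd) (po.length + 1) (by simp [← h])]
      simp only [List.map_cons]
      rw [pv_erase_append po o (rest.map Prod.fst) po.length rfl]
      rw [show (pn ++ [if o = '*' then c * m else if o = '+' then c + m else c - m]) ++
            rest.map Prod.snd =
            pn ++ (if o = '*' then c * m else if o = '+' then c + m else c - m) ::
              rest.map Prod.snd from by simp]
      rw [ih pn po _ h]
      simp [pvReduceLoop]
    · rw [if_neg (by rw [hget]; exact ho)]
      have hre : pn ++ c :: ((o, m) :: rest).map Prod.snd =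
          (pn ++ [c]) ++ m :: rest.map Prod.snd := by simp
      have hro : po ++ ((o, m) :: rest).map Prod.fst =
          (po ++ [o]) ++ rest.map Prod.fst := by simp
      have hlen : (pn ++ [c]).length = (po ++ [o]).length := by simp [h]
      have := ih (pn ++ [c]) (po ++ [o]) m hlen
      rw [hre, hro, show po.length + 1 = (po ++ [o]).length from by simp, this]
      simp [pvReduceLoop, ho]

lemma pvWhileA_zero (op : Char) (nums : List Int) (ops : List Char)
    (h : nums.length = ops.length + 1) :
    pvWhileA op nums ops 0 = pvReduceOnce nums ops op := by
  cases nums with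
  | nil => simp at h
  | cons c tl =>
    have hlen : ops.length = tl.length := by simpa using h.symm
    have hfst : (ops.zip tl).map Prod.fst = ops := List.map_fst_zip (le_of_eq hlen)
    have hsnd : (ops.zip tl).map Prod.snd = tl := List.map_snd_zip (le_of_eq hlen.symm)
    have := pvWhileA_eq op (ops.zip tl) [] [] c rfl
    simp only [List.nil_append, List.length_nil, hfst, hsnd] at this
    simpa [pvReduceOnce] using this

lemma pvReduceLoop_len (op : Char) (pairs : List (Char × Int)) :
    ∀ c, (pvReduceLoop op c pairs).1.length = (pvReduceLoop op c pairs).2.length + 1 := by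
  induction pairs with
  | nil => intro c; simp [pvReduceLoop]
  | cons p rest ih =>
    intro c
    obtain ⟨o, n⟩ := p
    by_cases ho : o = op <;> simp [pvReduceLoop, ho, ih]

lemma pv_fold_ord (ord : List Char) :
    ∀ (q : List Int × List Char), q.1.length = q.2.length + 1 →
      ord.foldl (fun q o => pvWhileA o q.1 q.2 0) q =
        ord.foldl (fun q o => pvReduceOnce q.1 q.2 o) q := by
  induction ord with
  | nil => intro q _; rfl
  | cons o rest ih =>
    intro q hq
    simp only [List.foldl_cons]
    rw [pvWhileA_zero o q.1 q.2 hq]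
    exact ih _ (by simpa [pvReduceOnce] using pvReduceLoop_len o _ _)

lemma pvParse_len (expression : String) :
    (pvParse expression).1.length = (pvParse expression).2.length + 1 := by
  unfold pvParse
  have : ∀ (l : List Char) (st : List Int × List Char × Int),
      st.1.length = st.2.1.length →
      (l.foldl (fun (st : List Int × List Char × Int) ch =>
        if ch.isDigit then (st.1, st.2.1, st.2.2 * 10 + ((ch.toNat : Int) - 48))
        else (st.1 ++ [st.2.2], st.2.1 ++ [ch], 0)) st).1.length =
      (l.foldl (fun (st : List Int × List Char × Int) ch =>
        if ch.isDigit then (st.1, st.2.1, st.2.2 * 10 + ((ch.toNat : Int) - 48))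
        else (st.1 ++ [st.2.2], st.2.1 ++ [ch], 0)) st).2.1.length := by
    intro l
    induction l with
    | nil => intro st h; exact h
    | cons ch rest ih =>
      intro st h
      simp only [List.foldl_cons]
      by_cases hd : ch.isDigit <;> simp only [hd, if_true] <;>
        exact ih _ (by simp [h])
  simpa using this expression.toList ([], [], 0) rfl

lemma pv_orders_fold (ords : List (List Char)) (p : List Int × List Char)
    (hp : p.1.length = p.2.length + 1) : ∀ (mv : Int),
    ords.foldl (fun mv ord =>
        let r := ord.foldl (fun q o => pvWhileA o q.1 q.2 0) p
        if |r.1.getD 0 0| > mv then |r.1.getD 0 0| else mv) mv =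
      ords.foldl (fun best ord =>
        let r := ord.foldl (fun q o => pvReduceOnce q.1 q.2 o) p
        max best |r.1.headD 0|) mv := by
  induction ords with
  | nil => intro mv; rfl
  | cons ord rest ih =>
    intro mv
    have hgd : ∀ (l : List Int), l.getD 0 0 = l.headD 0 := by
      intro l; cases l <;> rfl
    have hstep :
        (if |(ord.foldl (fun q o => pvWhileA o q.1 q.2 0) p).1.getD 0 0| > mv then
            |(ord.foldl (fun q o => pvWhileA o q.1 q.2 0) p).1.getD 0 0| else mv) =
        max mv |(ord.foldl (fun q o => pvReduceOnce q.1 q.2 o) p).1.headD 0| := by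
      rw [pv_fold_ord ord p hp, hgd]
      by_cases hc : |(List.foldl (fun q o => pvReduceOnce q.1 q.2 o) p ord).1.headD 0| > mv
      · rw [if_pos hc, max_eq_right (le_of_lt hc)]
      · rw [if_neg hc, max_eq_left (by omega)]
    simp only [List.foldl_cons]
    rw [hstep]
    exact ih _

-- ===== VERDICT (by name: the statement is the Claim_ definition above) =====
theorem solution_spec : Claim_equal_solution := by
  intro expression _
  unfold Spec_solution solution solution_alt
  exact pv_orders_fold _ (pvParse expression) (pvParse_len expression) (-1)
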